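-- pv_equiv track=rewrite | github.com/shikshartin-coder/storestreak | management_system/landing_website/search.py | search_pattern
-- ===== SOURCE A (Python) =====
-- def compute_lps(pattern):
--     # Longest Proper Prefix that is suffix array
--     lps = [0] * len(pattern)
--
--     prefi = 0
--     for i in range(1, len(pattern)):
--
--         # Phase 3: roll the prefix pointer back until match or
--         # beginning of pattern is reached
--         while prefi and pattern[i] != pattern[prefi]:
--             prefi = lps[prefi - 1]
--
--         # Phase 2: if match, record the LSP for the current `i`
--         # and move prefix pointer
--         if pattern[prefi] == pattern[i]:
--             prefi += 1
--             lps[i] = prefi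
--
--         # Phase 1: is implicit here because of the for loop and
--         # conditions considered above
--
--     return lps
--
-- def kmp(pattern, text):
--     match_indices = []
--     pattern_lps = compute_lps(pattern)
--
--     patterni = 0
--     for i, ch in enumerate(text):
--
--         # Phase 3: if a mismatch was found, roll back the pattern
--         # index using the information in LPS
--         while patterni and pattern[patterni] != ch:
--             patterni = pattern_lps[patterni - 1]
--
--         # Phase 2: if match
--         if pattern[patterni] == ch:
--             # If the end of a pattern is reached, record a result
--             # and use infromation in LSP array to shift the index
--             if patterni == len(pattern) - 1:
--                 match_indices.append(i - patterni)
--                 break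
--
--             else:
--                 # Move the pattern index forward
--                 patterni += 1
--
--         # Phase 1: is implicit here because of the for loop and
--         # conditions considered above
--     return match_indices
--
-- def search_pattern(pattern, search_objects_list):
--     if pattern == None or pattern == "":
--         return []
--     tuples_list = []
--     return_search_list = []
--     for search_object in search_objects_list:
--         search_string = search_object['name']
--         match_indices = kmp(pattern.lower(), search_string.lower().replace(" ",""))
--         if match_indices != []:
--             tuples_list.append((match_indices[0],search_object))
--     tuples_list_sorted = sorted(tuples_list, key=lambda tup: tup[0])
--
--     for index, tuple in enumerate(tuples_list_sorted):
--         return_search_list.append((tuple[1]))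
--
--     return return_search_list
-- ===== SOURCE B (Python) =====
-- def search_pattern(pattern, search_objects_list):
--     if pattern == None or pattern == "":
--         return []
--     pat = pattern.lower()
--     hits = [(search_object['name'].lower().replace(" ", "").find(pat), search_object)
--             for search_object in search_objects_list]
--     hits = [h for h in hits if h[0] != -1]
--     hits.sort(key=lambda h: h[0])
--     return [obj for _, obj in hits]
-- ===== Notes on version B (the rewrite author's own statement) =====
-- stated objective: simpler
-- what changed: Deletes the hand-written LPS-table/KMP automaton (compute_lps, kmp) and computes each normalized name's first-match index with the built-in str.find, collecting and stable-sorting (index, object) pairs in one comprehension pipeline.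
import Mathlib
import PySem

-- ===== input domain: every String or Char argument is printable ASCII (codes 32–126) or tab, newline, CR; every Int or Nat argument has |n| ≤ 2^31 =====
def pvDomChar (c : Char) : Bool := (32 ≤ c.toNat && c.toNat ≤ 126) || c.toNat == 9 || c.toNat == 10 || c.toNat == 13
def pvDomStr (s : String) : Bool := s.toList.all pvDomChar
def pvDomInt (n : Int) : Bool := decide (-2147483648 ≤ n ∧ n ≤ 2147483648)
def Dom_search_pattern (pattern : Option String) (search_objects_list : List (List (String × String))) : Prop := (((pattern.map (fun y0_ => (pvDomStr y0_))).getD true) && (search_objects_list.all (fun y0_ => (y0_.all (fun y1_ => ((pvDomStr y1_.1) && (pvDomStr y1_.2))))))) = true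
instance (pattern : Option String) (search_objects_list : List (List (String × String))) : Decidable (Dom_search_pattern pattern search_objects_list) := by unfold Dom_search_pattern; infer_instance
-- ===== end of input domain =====

-- B replaces A's hand-written LPS-table/KMP automaton by the built-in first-occurrence
-- substring search (str.find) on the same normalized strings; objective: simpler.

-- ===== PORT A =====
-- the shared shape of the two identical 'while prefi and pattern[i] != pattern[prefi]' /
-- 'while patterni and pattern[patterni] != ch' loops; fuel = entry value of the rolled-back
-- index (each step strictly decreases it since lps[j] ≤ j, so the fuel is never exhausted)
def pvRollback (pat : List Char) (lps : List Nat) (c : Char) : Nat → Nat → Nat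
  | q, 0 => q
  | q, fuel+1 =>
    if q ≠ 0 ∧ pat.getD q ' ' ≠ c then pvRollback pat lps c (lps.getD (q-1) 0) fuel else q

-- 'for i in range(1, len(pattern))' body of compute_lps
def pvLpsGo (pat : List Char) (i : Nat) (lps : List Nat) (prefi : Nat) : List Nat :=
  if _h : i < pat.length then
    let p' := pvRollback pat lps (pat.getD i ' ') prefi prefi
    if pat.getD p' ' ' = pat.getD i ' ' then
      pvLpsGo pat (i+1) (lps.set i (p'+1)) (p'+1)
    else
      pvLpsGo pat (i+1) lps p'
  else lps
termination_by pat.length - i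

def pvComputeLps (pat : List Char) : List Nat :=
  pvLpsGo pat 1 (List.replicate pat.length 0) 0

-- 'for i, ch in enumerate(text)' body of kmp (returns on the first full match = break)
def pvKmpGo (pat : List Char) (lps : List Nat) : List Char → Nat → Nat → List Int
  | [], _, _ => []
  | c :: rest, i, q =>
    let q' := pvRollback pat lps c q q
    if pat.getD q' ' ' = c then
      if q' = pat.length - 1 then [(i : Int) - (q' : Int)]
      else pvKmpGo pat lps rest (i+1) (q'+1)
    else pvKmpGo pat lps rest (i+1) q'

def pvKmp (pat text : List Char) : List Int :=
  pvKmpGo pat (pvComputeLps pat) text 0 0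

def search_pattern (pattern : Option String) (search_objects_list : List (List (String × String))) : List (List (String × String)) :=
  match pattern with
  | none => []
  | some p =>
    if p = "" then []
    else
      let tuples_list := search_objects_list.foldl
        (fun acc search_object =>
          let search_string := (PySem.Dict.mk search_object).getD "name" ""   -- KeyError excluded by Pre_
          let match_indices := pvKmp (PySem.Chars.lower p.toList)
              (PySem.Chars.replace (PySem.Chars.lower search_string.toList) [' '] [])
          match match_indices with
          | [] => acc
          | k :: _ => acc ++ [(k, search_object)])
        ([] : List (Int × List (String × String)))
      (PySem.List.sorted tuples_list (fun tup => tup.1) false).map (fun tup => tup.2)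

-- ===== PORT B =====
def search_pattern_alt (pattern : Option String) (search_objects_list : List (List (String × String))) : List (List (String × String)) :=
  match pattern with
  | none => []
  | some p =>
    if p = "" then []
    else
      let pat := PySem.Chars.lower p.toList
      let hits := search_objects_list.map (fun search_object =>
        (PySem.Chars.find
            (PySem.Chars.replace (PySem.Chars.lower ((PySem.Dict.mk search_object).getD "name" "").toList) [' '] [])
            pat,
         search_object))
      let hits2 := hits.filter (fun h => h.1 != -1)
      (PySem.List.sorted hits2 (fun h => h.1) false).map (fun h => h.2)

-- ===== PRECONDITION & SPEC =====
-- Pre_ excludes only inputs on which A raises KeyError: when the pattern is a nonempty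
-- string, every dict in the list must carry the key "name".
def Pre_search_pattern (pattern : Option String) (search_objects_list : List (List (String × String))) : Prop :=
  pattern = none ∨ pattern = some "" ∨
    ∀ obj ∈ search_objects_list, "name" ∈ obj.map Prod.fst
instance (pattern : Option String) (search_objects_list : List (List (String × String))) : Decidable (Pre_search_pattern pattern search_objects_list) := by unfold Pre_search_pattern; infer_instance
def pvWitness_search_pattern : Option String × (List (List (String × String))) :=
  (some "cat", [[("name", "The Cat")], [("name", "dog")]])

def Spec_search_pattern (pattern : Option String) (search_objects_list : List (List (String × String))) (out : List (List (String × String))) : Prop := out = search_pattern_alt pattern search_objects_list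
instance (pattern : Option String) (search_objects_list : List (List (String × String))) (out : List (List (String × String))) : Decidable (Spec_search_pattern pattern search_objects_list out) := by unfold Spec_search_pattern; infer_instance

-- ===== CLAIM (what is proved, stated in full; the proofs are below) =====
def Claim_equal_search_pattern : Prop := ∀ (pattern : Option String) (search_objects_list : List (List (String × String))), Dom_search_pattern pattern search_objects_list → Pre_search_pattern pattern search_objects_list → Spec_search_pattern pattern search_objects_list (search_pattern pattern search_objects_list)

-- ===== LEMMAS AND PROOFS =====

-- maximal k ≤ N with pat.take k a suffix of s (k = 0 always qualifies)
def pvMaxB (pat s : List Char) (N : Nat) : Nat :=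
  Nat.findGreatest (fun k => pat.take k <:+ s) N

theorem pv_concat_suffix (x y : List Char) (a b : Char) :
    x ++ [a] <:+ y ++ [b] ↔ x <:+ y ∧ a = b := by
  rw [← List.reverse_prefix, ← List.reverse_prefix]
  simp [List.cons_prefix_cons, and_comm]

theorem pv_border_succ (pat s : List Char) (c : Char) (k : Nat) (hk : k < pat.length) :
    pat.take (k+1) <:+ s ++ [c] ↔ pat.take k <:+ s ∧ pat.getD k ' ' = c := by
  rw [List.take_add_one, List.getElem?_eq_getElem hk]
  simp only [Option.toList_some]
  rw [pv_concat_suffix]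
  rw [List.getD_eq_getElem?_getD, List.getElem?_eq_getElem hk]
  simp

-- the state of the rollback loop when it has stopped
theorem pv_roll_stop (pat s : List Char) (c : Char) (q N : Nat)
    (hN : N < pat.length) (hqN : q ≤ N)
    (hq : pat.take q <:+ s)
    (hmax : ∀ k, k ≤ N → pat.take k <:+ s → k ≤ q)
    (hstop : q = 0 ∨ pat.getD q ' ' = c) :
    (if pat.getD q ' ' = c
      then pat.take (q + 1) <:+ s ++ [c] ∧
           ∀ k, k ≤ N+1 → pat.take k <:+ s ++ [c] → k ≤ q + 1
      else q = 0 ∧ ∀ k, k ≤ N+1 → pat.take k <:+ s ++ [c] → k = 0) := by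
  split_ifs with hc
  · refine ⟨(pv_border_succ pat s c q (lt_of_le_of_lt hqN hN)).mpr ⟨hq, hc⟩, ?_⟩
    intro k hk hb
    cases k with
    | zero => omega
    | succ k' =>
      have hk' : k' < pat.length := by omega
      have := (pv_border_succ pat s c k' hk').mp hb
      have := hmax k' (by omega) this.1
      omega
  · have hq0 : q = 0 := by tauto
    refine ⟨hq0, ?_⟩
    intro k hk hb
    cases k with
    | zero => rfl
    | succ k' =>
      have hk' : k' < pat.length := by omega
      have hb' := (pv_border_succ pat s c k' hk').mp hb
      have hkq : k' ≤ q := hmax k' (by omega) hb'.1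
      subst hq0
      have hk0 : k' = 0 := Nat.le_zero.mp hkq
      subst hk0
      exact absurd hb'.2 hc

-- the rollback loop computes the maximal border of s ++ [c] (in the 'if' form left by the code)
theorem pv_roll (pat : List Char) (lps : List Nat) (c : Char) (J : Nat)
    (hlps : ∀ j, j < J → lps.getD j 0 = pvMaxB pat (pat.take (j+1)) j) :
    ∀ fuel q N, ∀ s : List Char, q ≤ fuel → q ≤ J → q ≤ N → N < pat.length →
    pat.take q <:+ s →
    (∀ k, k ≤ N → pat.take k <:+ s → k ≤ q) →
    (pvRollback pat lps c q fuel ≤ q ∧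
     (if pat.getD (pvRollback pat lps c q fuel) ' ' = c
       then pat.take (pvRollback pat lps c q fuel + 1) <:+ s ++ [c] ∧
            ∀ k, k ≤ N+1 → pat.take k <:+ s ++ [c] → k ≤ pvRollback pat lps c q fuel + 1
       else pvRollback pat lps c q fuel = 0 ∧
            ∀ k, k ≤ N+1 → pat.take k <:+ s ++ [c] → k = 0)) := by
  intro fuel
  induction fuel with
  | zero =>
    intro q N s hf hJ hN hNm hq hmax
    have hq0 : q = 0 := Nat.le_zero.mp hf
    subst hq0
    refine ⟨le_refl 0, ?_⟩
    have h := pv_roll_stop pat s c 0 N hNm hN hq hmax (Or.inl rfl)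
    simp only [pvRollback]
    split_ifs at h ⊢ with hc
    · exact h
    · exact ⟨trivial, h.2⟩
  | succ f ih =>
    intro q N s hf hJ hN hNm hq hmax
    by_cases hg : q ≠ 0 ∧ pat.getD q ' ' ≠ c
    · -- loop body runs once
      have hstep : pvRollback pat lps c q (f+1) = pvRollback pat lps c (lps.getD (q-1) 0) f := by
        simp only [pvRollback, if_pos hg]
      obtain ⟨hq1, hq2⟩ := hg
      have hq1' : 1 ≤ q := Nat.one_le_iff_ne_zero.mpr hq1
      have hlq : lps.getD (q-1) 0 = pvMaxB pat (pat.take q) (q-1) := by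
        have := hlps (q-1) (by omega)
        rwa [Nat.sub_add_cancel hq1'] at this
      set q2 := lps.getD (q-1) 0 with hq2def
      have hq2le : q2 ≤ q - 1 := hlq ▸ Nat.findGreatest_le (q-1)
      have hq2b : pat.take q2 <:+ pat.take q := by
        rw [hlq]
        unfold pvMaxB
        exact Nat.findGreatest_spec (P := fun k => pat.take k <:+ pat.take q)
          (Nat.zero_le _) (by simp)
      have hq2s : pat.take q2 <:+ s := hq2b.trans hq
      have hmax2 : ∀ k, k ≤ q - 1 → pat.take k <:+ s → k ≤ q2 := by
        intro k hk hb
        have hkb : pat.take k <:+ pat.take q := by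
          apply List.suffix_of_suffix_length_le hb hq
          rw [List.length_take, List.length_take]
          omega
        rw [hlq]
        exact Nat.le_findGreatest hk hkb
      have hrec := ih q2 (q-1) s (by omega) (by omega) hq2le (by omega) hq2s hmax2
      rw [hstep]
      obtain ⟨hr1, hr2⟩ := hrec
      refine ⟨by omega, ?_⟩
      -- widen the max clauses from cap q to cap N+1
      have hwiden : ∀ k, k ≤ N+1 → pat.take k <:+ s ++ [c] → k ≤ q := by
        intro k hk hb
        cases k with
        | zero => omega
        | succ k' =>
          have hk' : k' < pat.length := by omega
          have hb' := (pv_border_succ pat s c k' hk').mp hb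
          have hkq : k' ≤ q := hmax k' (by omega) hb'.1
          rcases Nat.lt_or_ge k' q with h | h
          · omega
          · have : k' = q := by omega
            subst this
            exact absurd hb'.2 hq2
      split_ifs at hr2 ⊢ with hcr
      · refine ⟨hr2.1, ?_⟩
        intro k hk hb
        exact hr2.2 k (by have := hwiden k hk hb; omega) hb
      · refine ⟨hr2.1, ?_⟩
        intro k hk hb
        exact hr2.2 k (by have := hwiden k hk hb; omega) hb
    · have hstep : pvRollback pat lps c q (f+1) = q := by
        simp only [pvRollback, if_neg hg]
      rw [hstep]
      push Not at hg
      refine ⟨le_refl q, pv_roll_stop pat s c q N hNm hN hq hmax ?_⟩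
      by_cases h0 : q = 0
      · exact Or.inl h0
      · exact Or.inr (hg h0)

theorem pv_take_concat (pat : List Char) (i : Nat) (h : i < pat.length) :
    pat.take i ++ [pat.getD i ' '] = pat.take (i+1) := by
  rw [List.take_add_one, List.getElem?_eq_getElem h,
      List.getD_eq_getElem?_getD, List.getElem?_eq_getElem h]
  simp

theorem pv_lpsGo_inv (pat : List Char) :
    ∀ n i lps prefi, pat.length - i ≤ n → 1 ≤ i → lps.length = pat.length →
    (∀ j, j < i → lps.getD j 0 = pvMaxB pat (pat.take (j+1)) j) →
    (∀ j, i ≤ j → lps.getD j 0 = 0) →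
    prefi = pvMaxB pat (pat.take i) (i-1) →
    ∀ j, j < pat.length → (pvLpsGo pat i lps prefi).getD j 0 = pvMaxB pat (pat.take (j+1)) j := by
  intro n
  induction n with
  | zero =>
    intro i lps prefi hn h1 hlen hbelow hzero hpre j hj
    have : ¬ i < pat.length := by omega
    rw [pvLpsGo, dif_neg this]
    exact hbelow j (by omega)
  | succ n ih =>
    intro i lps prefi hn h1 hlen hbelow hzero hpre j hj
    by_cases hi : i < pat.length
    · rw [pvLpsGo, dif_pos hi]
      simp only []
      set c := pat.getD i ' ' with hc
      set r := pvRollback pat lps c prefi prefi with hr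
      have hpre_le : prefi ≤ i - 1 := hpre ▸ Nat.findGreatest_le (i-1)
      have hroll := pv_roll pat lps c i
        (fun j hji => hbelow j hji) prefi prefi (i-1) (pat.take i)
        (le_refl _) (by omega) hpre_le (by omega)
        (by rw [hpre]; unfold pvMaxB
            exact Nat.findGreatest_spec (P := fun k => pat.take k <:+ pat.take i)
              (Nat.zero_le _) (by simp))
        (by intro k hk hb; rw [hpre]; exact Nat.le_findGreatest hk hb)
      obtain ⟨hrle, hrif⟩ := hroll
      rw [pv_take_concat pat i hi] at hrif
      have hN1 : i - 1 + 1 = i := by omega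
      rw [hN1] at hrif
      split_ifs at hrif ⊢ with hcc
      · -- match: set lps[i] := r+1, prefi := r+1
        have hval : r + 1 = pvMaxB pat (pat.take (i+1)) i := by
          unfold pvMaxB
          symm
          rw [Nat.findGreatest_eq_iff]
          refine ⟨by omega, fun _ => hrif.1, ?_⟩
          intro k hk1 hk2 hb
          have := hrif.2 k (by omega) hb
          omega
        apply ih (i+1) (lps.set i (r+1)) (r+1) (by omega) (by omega) (by simpa using hlen)
        · intro j' hj'
          rcases Nat.lt_or_ge j' i with h | h
          · rw [List.getD_eq_getElem?_getD, List.getElem?_set_ne (by omega),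
                ← List.getD_eq_getElem?_getD]
            exact hbelow j' h
          · have hj'i : j' = i := by omega
            subst hj'i
            rw [List.getD_eq_getElem?_getD, List.getElem?_set_self (by omega),
                Option.getD_some]
            exact hval
        · intro j' hj'
          rw [List.getD_eq_getElem?_getD, List.getElem?_set_ne (by omega),
              ← List.getD_eq_getElem?_getD]
          exact hzero j' (by omega)
        · simpa using hval
        · exact hj
      · -- mismatch: r = 0, nothing recorded
        have hval : 0 = pvMaxB pat (pat.take (i+1)) i := by
          unfold pvMaxB
          symm
          rw [Nat.findGreatest_eq_iff]
          exact ⟨Nat.zero_le _, fun h => absurd rfl h, fun k hk1 hk2 hb => by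
            have := hrif.2 k (by omega) hb; omega⟩
        apply ih (i+1) lps r (by omega) (by omega) hlen
        · intro j' hj'
          rcases Nat.lt_or_ge j' i with h | h
          · exact hbelow j' h
          · have hj'i : j' = i := by omega
            rw [hzero j' (by omega), hj'i]
            exact hval
        · intro j' hj'
          exact hzero j' (by omega)
        · rw [hr, hrif.1]; simpa using hval
        · exact hj
    · rw [pvLpsGo, dif_neg hi]
      exact hbelow j (by omega)

theorem pv_lps_valid (pat : List Char) :
    ∀ j, j < pat.length → (pvComputeLps pat).getD j 0 = pvMaxB pat (pat.take (j+1)) j := by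
  intro j hj
  unfold pvComputeLps
  apply pv_lpsGo_inv pat (pat.length - 1) 1 _ _ (by omega) (le_refl 1) (by simp)
  · intro j' hj'
    have : j' = 0 := by omega
    subst this
    simp [pvMaxB, List.getD_eq_getElem?_getD]
  · intro j' _
    simp only [List.getD_eq_getElem?_getD, List.getElem?_replicate]
    split <;> rfl
  · simp [pvMaxB]
  · exact hj

theorem pv_find_eq (t sub : List Char) (j : Nat)
    (h1 : sub <+: t.drop j) (h2 : ∀ i, i < j → ¬ sub <+: t.drop i) :
    PySem.Chars.find t sub = (j : Int) := by
  have hinf : sub <:+: t :=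
    List.infix_iff_prefix_suffix.mpr ⟨t.drop j, h1, List.drop_suffix j t⟩
  have hnn : 0 ≤ PySem.Chars.find t sub := (PySem.Chars.find_nonneg_iff _ _).mpr hinf
  obtain ⟨hp, hmin⟩ := PySem.Chars.find_spec hnn
  have htn : (PySem.Chars.find t sub).toNat = j := by
    rcases lt_trichotomy (PySem.Chars.find t sub).toNat j with h | h | h
    · exact absurd hp (h2 _ h)
    · exact h
    · exact absurd h1 (hmin j h)
  omega

theorem pv_no_occ (pat s rest' : List Char) (hninf : ¬ pat <:+: s) (j : Nat)
    (hjm : j + pat.length ≤ s.length) : ¬ pat <+: (s ++ rest').drop j := by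
  intro hp
  apply hninf
  set mlen := pat.length with hm
  have hpt : pat = ((s ++ rest').drop j).take mlen := List.prefix_iff_eq_take.mp hp
  rw [List.take_drop, List.take_append_of_le_length (by omega)] at hpt
  have hsuf : pat <:+ (s.take (j + mlen)) := by
    rw [hpt]
    exact List.drop_suffix _ _
  exact hsuf.isInfix.trans (List.take_prefix _ _).isInfix

theorem pv_not_infix_snoc (pat s : List Char) (c : Char) (hninf : ¬ pat <:+: s)
    (hnb : ¬ pat <:+ s ++ [c]) : ¬ (pat <:+: s ++ [c]) := by
  intro h
  obtain ⟨t, hst, htp⟩ := List.infix_iff_suffix_prefix.mp h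
  have hte : t = (s ++ [c]).take t.length := List.prefix_iff_eq_take.mp htp
  have htl : t.length ≤ s.length + 1 := by
    have := htp.length_le
    simpa using this
  rcases Nat.lt_or_ge t.length (s.length + 1) with hlt | hge
  · rw [List.take_append_of_le_length (by omega)] at hte
    exact hninf (((hte ▸ hst : pat <:+ s.take t.length)).isInfix.trans
      (List.take_prefix _ _).isInfix)
  · have : t = s ++ [c] := htp.eq_of_length (by simpa using le_antisymm htl hge)
    exact hnb (this ▸ hst)

theorem pv_kmpGo_spec (pat : List Char) (hpat : pat ≠ []) :
    ∀ rest s q, q = pvMaxB pat s (pat.length - 1) → ¬ pat <:+: s →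
    pvKmpGo pat (pvComputeLps pat) rest s.length q =
      (if PySem.Chars.find (s ++ rest) pat = -1 then []
       else [PySem.Chars.find (s ++ rest) pat]) := by
  have hm1 : 1 ≤ pat.length := List.length_pos_iff.mpr hpat
  intro rest
  induction rest with
  | nil =>
    intro s q hq hninf
    rw [pvKmpGo]
    rw [if_pos (by simpa using (PySem.Chars.find_eq_neg_one_iff _ _).mpr (by simpa using hninf))]
  | cons c rest ih =>
    intro s q hq hninf
    rw [pvKmpGo]
    have hqle : q ≤ pat.length - 1 := hq ▸ Nat.findGreatest_le (pat.length - 1)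
    have hroll := pv_roll pat (pvComputeLps pat) c pat.length
      (fun j hj => pv_lps_valid pat j hj) q q (pat.length - 1) s
      (le_refl q) (by omega) hqle (by omega)
      (by rw [hq]; unfold pvMaxB
          exact Nat.findGreatest_spec (P := fun k => pat.take k <:+ s)
            (Nat.zero_le _) (by simp))
      (by intro k hk hb; rw [hq]; exact Nat.le_findGreatest hk hb)
    set r := pvRollback pat (pvComputeLps pat) c q q with hr
    obtain ⟨hrle, hrif⟩ := hroll
    have hN1 : pat.length - 1 + 1 = pat.length := by omega
    rw [hN1] at hrif
    by_cases hcc : pat.getD r ' ' = c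
    · -- pattern char at r matches c
      rw [if_pos hcc] at hrif
      rw [if_pos hcc]
      by_cases hlast : r = pat.length - 1
      · rw [if_pos hlast]
        have hps : pat <:+ s ++ [c] := by
          have h0 := hrif.1
          rw [hlast, hN1, List.take_length] at h0
          exact h0
        obtain ⟨u, hu⟩ := hps
        have hul : u.length + pat.length = s.length + 1 := by
          have := congrArg List.length hu
          simpa using this
        have hfind : PySem.Chars.find (s ++ c :: rest) pat = (u.length : Int) := by
          apply pv_find_eq
          · have heq : s ++ c :: rest = u ++ (pat ++ rest) := by
              rw [← List.append_assoc, hu]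
              simp
            rw [heq, List.drop_left]
            exact List.prefix_append pat rest
          · intro i hi
            exact pv_no_occ pat s (c :: rest) hninf i (by omega)
        rw [hfind, if_neg (by omega)]
        have hv : ((s.length : Int) - (r : Int)) = (u.length : Int) := by
          rw [hlast]
          omega
        rw [hv]
      · rw [if_neg hlast]
        have hnocc : ¬ pat <:+ s ++ [c] := by
          intro hb
          have := hrif.2 pat.length (le_refl _) (by rwa [List.take_length])
          omega
        have hstep : s.length + 1 = (s ++ [c]).length := by simp
        rw [hstep]
        have hres := ih (s ++ [c]) (r + 1)
          (by unfold pvMaxB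
              symm
              rw [Nat.findGreatest_eq_iff]
              refine ⟨by omega, fun _ => hrif.1, ?_⟩
              intro k hk1 hk2 hb
              have := hrif.2 k (by omega) hb
              omega)
          (pv_not_infix_snoc pat s c hninf hnocc)
        rw [hres, List.append_assoc]
        simp
    · -- mismatch after rollback: r = 0
      rw [if_neg hcc] at hrif
      rw [if_neg hcc]
      have hnocc : ¬ pat <:+ s ++ [c] := by
        intro hb
        have := hrif.2 pat.length (le_refl _) (by rwa [List.take_length])
        omega
      have hstep : s.length + 1 = (s ++ [c]).length := by simp
      rw [hstep]
      have hres := ih (s ++ [c]) 0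
        (by unfold pvMaxB
            symm
            rw [Nat.findGreatest_eq_iff]
            refine ⟨Nat.zero_le _, fun h => absurd rfl h, ?_⟩
            intro k hk1 hk2 hb
            have := hrif.2 k (by omega) hb
            omega)
        (pv_not_infix_snoc pat s c hninf hnocc)
      rw [hrif.1, hres, List.append_assoc]
      simp

theorem pvKmp_eq_find (pat text : List Char) (h : pat ≠ []) :
    pvKmp pat text =
      if PySem.Chars.find text pat = -1 then [] else [PySem.Chars.find text pat] := by
  unfold pvKmp
  have h0 : (0 : Nat) = pvMaxB pat ([] : List Char) (pat.length - 1) := by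
    unfold pvMaxB
    symm
    rw [Nat.findGreatest_eq_iff]
    refine ⟨Nat.zero_le _, fun hh => absurd rfl hh, ?_⟩
    intro k hk1 hk2 hb
    have hnil := List.suffix_nil.mp hb
    rw [List.take_eq_nil_iff] at hnil
    rcases hnil with h' | h'
    · omega
    · exact h h'
  have := pv_kmpGo_spec pat h text [] 0 h0 (by simp [List.infix_nil]; intro hc; exact h hc)
  simpa using this

theorem search_pattern_spec : Claim_equal_search_pattern := by
  unfold Claim_equal_search_pattern Spec_search_pattern
  intro pattern sol _hdom _hpre
  cases pattern with
  | none => rfl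
  | some p =>
    unfold search_pattern search_pattern_alt
    dsimp only
    by_cases hp : p = ""
    · rw [if_pos hp, if_pos hp]
    · rw [if_neg hp, if_neg hp]
      have hpat : PySem.Chars.lower p.toList ≠ [] := by
        simp [PySem.Chars.lower]
        simpa using hp
      set pat := PySem.Chars.lower p.toList with hpatdef
      set txt : List (String × String) → List Char := fun obj =>
        PySem.Chars.replace (PySem.Chars.lower ((PySem.Dict.mk obj).getD "name" "").toList) [' '] []
        with htxt
      set F : List (String × String) → Int × List (String × String) := fun obj =>
        (PySem.Chars.find (txt obj) pat, obj) with hF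
      have hfoldl : sol.foldl
          (fun acc search_object =>
            match pvKmp pat (txt search_object) with
            | [] => acc
            | k :: _ => acc ++ [(k, search_object)]) [] =
          (sol.filter (fun x => decide (PySem.Chars.find (txt x) pat ≠ -1))).map F := by
        refine Eq.trans (PySem.List.foldl_congr_mem sol _
          (fun acc x => if PySem.Chars.find (txt x) pat ≠ -1 then acc ++ [F x] else acc) [] ?_) ?_
        · intro acc x _
          rw [pvKmp_eq_find pat (txt x) hpat]
          by_cases hf : PySem.Chars.find (txt x) pat = -1
          · rw [if_pos hf]
            simp [hf]
          · rw [if_neg hf]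
            simp [hf, hF]
        · rw [PySem.List.foldl_append_ite (p := fun x => PySem.Chars.find (txt x) pat ≠ -1)]
          simp
      have hB : (sol.map F).filter (fun h => h.1 != -1) =
          (sol.filter (fun x => decide (PySem.Chars.find (txt x) pat ≠ -1))).map F := by
        rw [List.filter_map]
        congr 1
        apply List.filter_congr
        intro x _
        simp only [Function.comp_apply, hF, bne, ne_eq, decide_not]
        rfl
      rw [hfoldl, ← hB]
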